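-- pv_equiv track=rewrite | github.com/sagemath/sage-archive-2023-02-01 | src/sage/modular/multiple_zeta.py | iterated_to_composition
-- ===== SOURCE A (Python) =====
-- def iterated_to_composition(w, reverse=False):
--     """
--     Convert a word in 0 and 1 to a composition.
--
--     By default, the chosen convention maps (1,0,1,0,0) to (2,3).
--
--     The inverse map is given by :func:`composition_to_iterated`.
--
--     EXAMPLES::
--
--         sage: from sage.modular.multiple_zeta import iterated_to_composition
--         sage: iterated_to_composition([1,0,1,0,0])
--         (2, 3)
--         sage: iterated_to_composition(Word([1,1,0]))
--         (1, 2)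
--         sage: iterated_to_composition(Word([1,1,0,1,1,0,0]))
--         (1, 2, 1, 3)
--
--     TESTS::
--
--         sage: iterated_to_composition([1,0,1,0,0], True)
--         (3, 2)
--     """
--     b = []
--     count = 1
--     for letter in reversed(w):
--         if letter == 0:
--             count += 1
--         else:
--             b.append(count)
--             count = 1
--     return tuple(b) if reverse else tuple(reversed(b))
-- ===== SOURCE B (Python) =====
-- def iterated_to_composition(w, reverse=False):
--     n = len(w)
--     ones = [i for i, l in enumerate(w) if l != 0]
--     parts = [b - a for a, b in zip(ones, ones[1:] + [n])]
--     return tuple(reversed(parts)) if reverse else tuple(parts)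
-- ===== Notes on version B (the rewrite author's own statement) =====
-- stated objective: idiomatic
-- what changed: Replaces A's reversed-order counter loop (count zeros, append on each nonzero, then re-reverse) by a direct forward computation: collect the indices of the nonzero letters and take differences of consecutive indices (last one against len(w)).
import Mathlib
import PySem

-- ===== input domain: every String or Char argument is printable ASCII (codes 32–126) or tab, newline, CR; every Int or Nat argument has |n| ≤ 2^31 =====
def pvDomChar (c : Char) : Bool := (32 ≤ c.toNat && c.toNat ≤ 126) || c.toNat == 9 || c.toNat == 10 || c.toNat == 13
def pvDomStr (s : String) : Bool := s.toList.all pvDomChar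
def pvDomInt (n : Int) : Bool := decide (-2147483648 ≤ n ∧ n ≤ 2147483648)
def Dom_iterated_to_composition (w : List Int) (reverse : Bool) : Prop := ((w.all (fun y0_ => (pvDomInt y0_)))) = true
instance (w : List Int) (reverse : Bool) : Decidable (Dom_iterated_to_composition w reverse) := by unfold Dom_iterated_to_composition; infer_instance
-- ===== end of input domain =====

-- ===== PORT A =====
-- B replaces A's reversed-traversal counter loop by an index/gap computation; objective: simpler/idiomatic.
def iterated_to_composition (w : List Int) (reverse : Bool) : List Int :=
  -- b = [], count = 1; for letter in reversed(w): ...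
  let st := w.reverse.foldl
    (fun (st : List Int × Int) letter =>
      if letter = 0 then (st.1, st.2 + 1) else (st.1 ++ [st.2], 1))
    ([], 1)
  -- tuple(b) if reverse else tuple(reversed(b))
  if reverse then st.1 else st.1.reverse

-- ===== PORT B =====
def iterated_to_composition_alt (w : List Int) (reverse : Bool) : List Int :=
  let n : Int := w.length
  -- ones = [i for i, l in enumerate(w) if l != 0]
  let ones : List Int := (PySem.List.enumerate w 0).filterMap
    (fun p => if p.2 ≠ 0 then some p.1 else none)
  -- parts = [b - a for a, b in zip(ones, ones[1:] + [n])]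
  let parts : List Int := (ones.zip (ones.drop 1 ++ [n])).map (fun p => p.2 - p.1)
  if reverse then parts.reverse else parts

-- ===== PRECONDITION & SPEC =====
def Spec_iterated_to_composition (w : List Int) (reverse : Bool) (out : List Int) : Prop := out = iterated_to_composition_alt w reverse
instance (w : List Int) (reverse : Bool) (out : List Int) : Decidable (Spec_iterated_to_composition w reverse out) := by unfold Spec_iterated_to_composition; infer_instance

-- ===== CLAIM (what is proved, stated in full; the proofs are below) =====
def Claim_equal_iterated_to_composition : Prop := ∀ (w : List Int) (reverse : Bool), Dom_iterated_to_composition w reverse → Spec_iterated_to_composition w reverse (iterated_to_composition w reverse)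

-- ===== LEMMAS AND PROOFS =====

-- number of leading zeros of the word
def pvLeadZ : List Int → Int
  | [] => 0
  | a :: t => if a = 0 then 1 + pvLeadZ t else 0

-- the forward composition of the word
def pvP : List Int → List Int
  | [] => []
  | a :: t => if a = 0 then pvP t else (1 + pvLeadZ t) :: pvP t

-- indices (starting at offset k) of the non-zero letters
def pvOnes (k : Int) : List Int → List Int
  | [] => []
  | a :: t => if a = 0 then pvOnes (k + 1) t else k :: pvOnes (k + 1) t

def pvGaps (os : List Int) (n : Int) : List Int :=
  (os.zip (os.drop 1 ++ [n])).map (fun p => p.2 - p.1)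

theorem pvOnes_filterMap (w : List Int) (k : Int) :
    (PySem.List.enumerate w k).filterMap (fun p => if p.2 ≠ 0 then some p.1 else none)
      = pvOnes k w := by
  induction w generalizing k with
  | nil => simp [PySem.List.enumerate_nil, pvOnes]
  | cons a t ih =>
    rw [PySem.List.enumerate_cons]
    by_cases h : a = 0
    · rw [List.filterMap_cons_none (by simp [h]), ih,
        show pvOnes k (a :: t) = pvOnes (k + 1) t from by simp [pvOnes, h]]
    · rw [List.filterMap_cons_some (b := k) (by simp [h]), ih,
        show pvOnes k (a :: t) = k :: pvOnes (k + 1) t from by simp [pvOnes, h]]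

theorem pvOnes_headD (t : List Int) (k : Int) :
    (pvOnes k t ++ [k + (t.length : Int)]).headD 0 = k + pvLeadZ t := by
  induction t generalizing k with
  | nil => simp [pvOnes, pvLeadZ]
  | cons a t ih =>
    by_cases h : a = 0
    · have harith : k + (((a :: t).length : Int)) = (k + 1) + (t.length : Int) := by
        simp; ring
      rw [show pvOnes k (a :: t) = pvOnes (k + 1) t by simp [pvOnes, h], harith, ih]
      simp [pvLeadZ, h]
      ring
    · simp [pvOnes, pvLeadZ, h]

theorem pvGaps_cons (k : Int) (os : List Int) (n : Int) :
    pvGaps (k :: os) n = ((os ++ [n]).headD 0 - k) :: pvGaps os n := by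
  cases os <;> simp [pvGaps]

theorem pvGaps_pvOnes (t : List Int) (k : Int) :
    pvGaps (pvOnes k t) (k + (t.length : Int)) = pvP t := by
  induction t generalizing k with
  | nil => simp [pvOnes, pvP, pvGaps]
  | cons a t ih =>
    have harith : k + (((a :: t).length : Int)) = (k + 1) + (t.length : Int) := by
      simp; ring
    by_cases h : a = 0
    · rw [show pvOnes k (a :: t) = pvOnes (k + 1) t by simp [pvOnes, h], harith, ih, pvP,
        if_pos h]
    · rw [show pvOnes k (a :: t) = k :: pvOnes (k + 1) t by simp [pvOnes, h], harith,
        pvGaps_cons, ih, pvOnes_headD, pvP]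
      simp [h]
      ring

theorem pvFoldA (w : List Int) :
    w.reverse.foldl
      (fun (st : List Int × Int) letter =>
        if letter = 0 then (st.1, st.2 + 1) else (st.1 ++ [st.2], 1))
      ([], 1)
      = ((pvP w).reverse, 1 + pvLeadZ w) := by
  induction w with
  | nil => simp [pvP, pvLeadZ]
  | cons a t ih =>
    rw [List.reverse_cons, List.foldl_append, ih]
    by_cases h : a = 0
    · simp [h, pvP, pvLeadZ]
      ring
    · simp [h, pvP, pvLeadZ]

-- ===== VERDICT (by name: the statement is the Claim_ definition above) =====
theorem iterated_to_composition_spec : Claim_equal_iterated_to_composition := by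
  intro w reverse _
  show iterated_to_composition w reverse = iterated_to_composition_alt w reverse
  unfold iterated_to_composition iterated_to_composition_alt
  rw [pvFoldA, pvOnes_filterMap]
  have h0 : (0 : Int) + (w.length : Int) = (w.length : Int) := by ring
  have := pvGaps_pvOnes w 0
  rw [h0] at this
  simp only [pvGaps, List.drop_one] at this
  cases reverse <;> simp [this]
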